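-- pv_equiv track=rewrite | github.com/raeez/chiral-bar-cobar | compute/lib/grand_synthesis_engine.py | y_algebra_shadow_class
-- ===== SOURCE A (Python) =====
-- def y_algebra_shadow_class(N1: int, N2: int, N3: int) -> str:
--     """Predict shadow depth class for Y_{N1,N2,N3}.
--
--     Rules (verified in gaiotto_rapcak_landscape_engine.py):
--       - All Ni = 0: G (trivial)
--       - max(Ni) = 1 and sorted triple is (0,0,1): G (single free boson)
--       - max(Ni) = 1 and sorted triple is (0,1,1): L (affine-type)
--       - max(Ni) = 1 and sorted triple is (1,1,1): M (N=2 super, self-coupling)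
--       - max(Ni) >= 2: M (W_N subalgebra forces infinite depth)
--
--     NOTE: class C (betagamma) does NOT appear for Y-algebras.
--     This is a PREDICTION of the landscape engine.
--     """
--     triple = sorted([N1, N2, N3])
--
--     if all(n == 0 for n in triple):
--         return 'G'  # trivial
--     if triple == [0, 0, 1]:
--         return 'G'  # single free boson
--     if triple == [0, 1, 1]:
--         return 'L'  # affine-type
--     if triple == [1, 1, 1]:
--         return 'M'  # N=2 super, nontrivial self-coupling
--     if max(triple) >= 2:
--         return 'M'  # W_N subalgebra
--     return 'M'  # default for nontrivial cases
-- ===== SOURCE B (Python) =====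
-- def y_algebra_shadow_class(N1: int, N2: int, N3: int) -> str:
--     vals = (N1, N2, N3)
--     zeros = sum(1 for v in vals if v == 0)
--     ones = sum(1 for v in vals if v == 1)
--     if zeros == 3 or (zeros == 2 and ones == 1):
--         return 'G'
--     if zeros == 1 and ones == 2:
--         return 'L'
--     return 'M'
-- ===== Notes on version B (the rewrite author's own statement) =====
-- stated objective: simpler
-- what changed: Replaced A's sort-then-compare-against-sorted-triples chain by directly counting how many of the three arguments are 0 and how many are 1 and classifying from those two counts; no sort, no list comparisons, no max.
import Mathlib
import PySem

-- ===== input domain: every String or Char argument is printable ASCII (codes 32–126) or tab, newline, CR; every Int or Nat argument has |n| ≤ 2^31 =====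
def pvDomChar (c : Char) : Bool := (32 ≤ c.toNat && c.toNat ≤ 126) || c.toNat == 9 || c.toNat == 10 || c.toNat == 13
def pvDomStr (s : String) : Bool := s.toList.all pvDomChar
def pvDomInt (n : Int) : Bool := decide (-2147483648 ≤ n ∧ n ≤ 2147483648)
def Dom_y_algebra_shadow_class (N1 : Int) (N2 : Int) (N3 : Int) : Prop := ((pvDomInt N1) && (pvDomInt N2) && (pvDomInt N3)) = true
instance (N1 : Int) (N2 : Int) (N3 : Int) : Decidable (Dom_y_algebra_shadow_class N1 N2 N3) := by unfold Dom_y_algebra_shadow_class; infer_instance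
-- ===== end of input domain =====

-- B drops A's sort and sorted-list comparisons: it classifies directly from the counts of zeros and ones among the three arguments (simpler).

-- ===== PORT A =====
def y_algebra_shadow_class (N1 : Int) (N2 : Int) (N3 : Int) : String :=
  let triple := PySem.List.sorted [N1, N2, N3] (fun x => x) false
  if triple.all (fun n => n == 0) then "G"        -- all(n == 0 for n in triple)
  else if triple == [0, 0, 1] then "G"
  else if triple == [0, 1, 1] then "L"
  else if triple == [1, 1, 1] then "M"
  else match PySem.List.max? triple (fun x => x) with  -- max(triple); the list is nonempty so max? is some
    | some m => if 2 ≤ m then "M" else "M"             -- this branch and the final default both return 'M'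
    | none => "M"

-- ===== PORT B =====
def y_algebra_shadow_class_alt (N1 : Int) (N2 : Int) (N3 : Int) : String :=
  let vals := [N1, N2, N3]
  let zeros := vals.countP (fun v => v == 0)
  let ones := vals.countP (fun v => v == 1)
  if zeros == 3 || (zeros == 2 && ones == 1) then "G"
  else if zeros == 1 && ones == 2 then "L"
  else "M"

-- ===== PRECONDITION & SPEC =====
def Spec_y_algebra_shadow_class (N1 : Int) (N2 : Int) (N3 : Int) (out : String) : Prop := out = y_algebra_shadow_class_alt N1 N2 N3
instance (N1 : Int) (N2 : Int) (N3 : Int) (out : String) : Decidable (Spec_y_algebra_shadow_class N1 N2 N3 out) := by unfold Spec_y_algebra_shadow_class; infer_instance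

-- ===== CLAIM (what is proved, stated in full; the proofs are below) =====
def Claim_equal_y_algebra_shadow_class : Prop := ∀ (N1 : Int) (N2 : Int) (N3 : Int), Dom_y_algebra_shadow_class N1 N2 N3 → Spec_y_algebra_shadow_class N1 N2 N3 (y_algebra_shadow_class N1 N2 N3)

-- ===== LEMMAS AND PROOFS =====

-- A's last two branches both return "M", whatever max? yields.
theorem mmatch (l : List Int) :
    (match PySem.List.max? l (fun x => x) with
      | some m => if 2 ≤ m then "M" else "M"
      | none => "M") = "M" := by
  cases PySem.List.max? l (fun x => x) with
  | none => rfl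
  | some m => by_cases h : 2 ≤ m <;> simp [h]

-- On an ascending triple, A's branch chain agrees with B's zero/one counting.
set_option maxHeartbeats 4000000 in
theorem key_sorted_triple (x y z : Int) (hxy : x ≤ y) (hyz : y ≤ z) :
    (if ([x, y, z] : List Int).all (fun n => n == 0) then "G"
     else if ([x, y, z] : List Int) == [0, 0, 1] then "G"
     else if ([x, y, z] : List Int) == [0, 1, 1] then "L"
     else if ([x, y, z] : List Int) == [1, 1, 1] then "M"
     else match PySem.List.max? [x, y, z] (fun v => v) with
       | some m => if 2 ≤ m then "M" else "M"
       | none => "M")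
    = (if ([x, y, z] : List Int).countP (fun v => v == 0) == 3 ||
          (([x, y, z] : List Int).countP (fun v => v == 0) == 2 &&
           ([x, y, z] : List Int).countP (fun v => v == 1) == 1) then "G"
       else if ([x, y, z] : List Int).countP (fun v => v == 0) == 1 &&
               ([x, y, z] : List Int).countP (fun v => v == 1) == 2 then "L"
       else "M") := by
  rw [mmatch]
  simp only [List.all_cons, List.all_nil, List.countP_cons, List.countP_nil, beq_iff_eq,
    List.cons.injEq, and_true, Bool.and_true, Bool.and_eq_true, Bool.or_eq_true,
    decide_eq_true_eq]
  split_ifs <;> first | rfl | omega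

-- ===== VERDICT (by name: the statement is the Claim_ definition above) =====
theorem y_algebra_shadow_class_spec : Claim_equal_y_algebra_shadow_class := by
  intro N1 N2 N3 _
  unfold Spec_y_algebra_shadow_class y_algebra_shadow_class y_algebra_shadow_class_alt
  have hperm := PySem.List.sorted_perm [N1, N2, N3] (fun x => x) false
  have hpair := PySem.List.sorted_pairwise [N1, N2, N3] (fun x => x)
  have hlen : (PySem.List.sorted [N1, N2, N3] (fun x => x) false).length = 3 :=
    hperm.length_eq
  rcases hl : PySem.List.sorted [N1, N2, N3] (fun x => x) false with _ | ⟨x, _ | ⟨y, _ | ⟨z, _ | ⟨w, t⟩⟩⟩⟩ <;>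
    rw [hl] at hlen <;> simp only [List.length] at hlen <;> try omega
  rw [hl] at hperm hpair
  simp only [List.pairwise_cons, List.mem_cons, List.mem_singleton, List.not_mem_nil] at hpair
  have hxy : x ≤ y := hpair.1 y (Or.inl rfl)
  have hyz : y ≤ z := hpair.2.1 z (by simp)
  rw [key_sorted_triple x y z hxy hyz,
    hperm.countP_eq (fun v => v == 0), hperm.countP_eq (fun v => v == 1)]
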